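-- pv_equiv track=rewrite | github.com/lironpaz7/Population_Statistics | Data.py | filter_by_features
-- ===== SOURCE A (Python) =====
-- def filter_by_features(data, feature, values):
--     """
--     This function receives a dictionary, a feature (age, earnings, etc..) and values which is a set of numbers
--     which is allowed for filtering. We created two new dictionaries that will contain the wanted data
--     and the unwanted data. The first for loop copies the key from the original dict(data) and an empty list.
--     We created a zipped_new_data which is a set of tuples (value of the feature in the original dict, index). Finally
--     we check for each key and for each tuple whether the data value (tuple[0]) is in values range (meets the set
--     requirements) and copies the data to the wanted_data dict, otherwise (if the values aren't in the set) copies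
--     to the unwanted_data dict. Then we returned the two dictionary (Python return them as a tuple of two dict).
--     :param data: dictionary
--     :param feature: feature from data
--     :param values: set of numbers
--     :return:
--     """
--     wanted_data = dict()
--     unwanted_data = dict()
--
--     for key in data.keys():
--         wanted_data.update({key: []})
--         unwanted_data.update({key: []})
--
--     zipped_new_data = [(i, j) for i, j in zip(data[feature], range(len(data[feature])))]
--     # list of tuples that consist the feature value and an index so we can loop through the wanted data only
--     # if exist in values set.
--     for key in data.keys():
--         for value_index in zipped_new_data:
--             if value_index[0] in values:
--                 wanted_data[key].append(data[key][value_index[1]])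
--             else:
--                 unwanted_data[key].append(data[key][value_index[1]])
--
--     return wanted_data, unwanted_data
-- ===== SOURCE B (Python) =====
-- def filter_by_features(data, feature, values):
--     col = data[feature]
--     wanted_i = [i for i, v in enumerate(col) if v in values]
--     unwanted_i = [i for i, v in enumerate(col) if v not in values]
--     wanted = {k: [c[i] for i in wanted_i] for k, c in data.items()}
--     unwanted = {k: [c[i] for i in unwanted_i] for k, c in data.items()}
--     return wanted, unwanted
-- ===== Notes on version B (the rewrite author's own statement) =====
-- stated objective: simpler
-- what changed: B makes one pass over the feature column to build the wanted/unwanted index lists and then produces each output column by a single indexing map per key, instead of A's per-key re-scan of the zipped feature column with a membership test for every (key, row) pair.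
import Mathlib
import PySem

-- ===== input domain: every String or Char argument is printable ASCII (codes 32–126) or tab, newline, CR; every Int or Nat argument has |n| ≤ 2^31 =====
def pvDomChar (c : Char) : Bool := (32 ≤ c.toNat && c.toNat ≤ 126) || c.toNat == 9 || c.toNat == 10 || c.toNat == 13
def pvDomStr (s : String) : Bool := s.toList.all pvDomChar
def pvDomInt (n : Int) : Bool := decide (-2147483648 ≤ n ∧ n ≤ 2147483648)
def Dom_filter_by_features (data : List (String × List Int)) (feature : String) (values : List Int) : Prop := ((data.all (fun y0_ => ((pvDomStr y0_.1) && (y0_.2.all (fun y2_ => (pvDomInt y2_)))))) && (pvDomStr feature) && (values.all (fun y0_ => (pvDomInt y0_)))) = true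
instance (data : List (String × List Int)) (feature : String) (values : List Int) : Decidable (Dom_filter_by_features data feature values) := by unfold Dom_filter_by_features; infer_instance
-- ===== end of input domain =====

-- B builds the partition once as two index lists from the feature column and then produces each
-- output column by a single indexing map, instead of A's per-key re-scan of the zipped feature
-- column with a membership test for every (key, row) pair (objective: simpler decomposition).

-- ===== PORT A =====
def filter_by_features (data : List (String × List Int)) (feature : String) (values : List Int) : (List (String × List Int)) × (List (String × List Int)) :=
  let d : PySem.Dict String (List Int) := PySem.Dict.mk data
  let wanted0 : PySem.Dict String (List Int) :=
    d.keys.foldl (fun w k => w.insert k []) PySem.Dict.empty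
  let unwanted0 : PySem.Dict String (List Int) :=
    d.keys.foldl (fun u k => u.insert k []) PySem.Dict.empty
  -- data[feature]: Pre_ guarantees the key is present (Python raises KeyError otherwise)
  let col := (d.get? feature).getD []
  let zipped := col.zip (PySem.List.pyRange 0 (col.length : Int) 1)
  let res := d.keys.foldl
    (fun (wu : PySem.Dict String (List Int) × PySem.Dict String (List Int)) k =>
      zipped.foldl
        (fun (wu : PySem.Dict String (List Int) × PySem.Dict String (List Int)) vi =>
          -- data[key][vi.2]: Pre_ guarantees the index is in range (IndexError otherwise)
          if vi.1 ∈ values then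
            (wu.1.modify k [] (· ++ [PySem.List.pyGetD ((d.get? k).getD []) vi.2 0]), wu.2)
          else
            (wu.1, wu.2.modify k [] (· ++ [PySem.List.pyGetD ((d.get? k).getD []) vi.2 0])))
        wu)
    (wanted0, unwanted0)
  (res.1.items, res.2.items)

-- ===== PORT B =====
def filter_by_features_alt (data : List (String × List Int)) (feature : String) (values : List Int) : (List (String × List Int)) × (List (String × List Int)) :=
  let col := ((PySem.Dict.mk data).get? feature).getD []
  let wi := ((PySem.List.enumerate col).filter (fun p => decide (p.2 ∈ values))).map (·.1)
  let ui := ((PySem.List.enumerate col).filter (fun p => decide (p.2 ∉ values))).map (·.1)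
  let wanted := data.map (fun p => (p.1, wi.map (fun i => PySem.List.pyGetD p.2 i 0)))
  let unwanted := data.map (fun p => (p.1, ui.map (fun i => PySem.List.pyGetD p.2 i 0)))
  (wanted, unwanted)

-- ===== PRECONDITION & SPEC =====
-- Pre_ excludes: assoc lists with duplicate keys (no Python dict can represent them, so A's value
-- there is an artefact of the encoding); a feature key that is absent (Python A raises KeyError);
-- and columns shorter than the feature column (Python A raises IndexError).
def Pre_filter_by_features (data : List (String × List Int)) (feature : String) (values : List Int) : Prop :=
  (data.map Prod.fst).Nodup ∧ feature ∈ data.map Prod.fst ∧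
  ∀ p ∈ data, (((PySem.Dict.mk data).get? feature).getD []).length ≤ p.2.length
instance (data : List (String × List Int)) (feature : String) (values : List Int) : Decidable (Pre_filter_by_features data feature values) := by unfold Pre_filter_by_features; infer_instance

def pvWitness_filter_by_features : (List (String × List Int)) × String × List Int :=
  ([("age", [1, 5, 2]), ("pay", [10, 20, 30])], "age", [1, 2])

def Spec_filter_by_features (data : List (String × List Int)) (feature : String) (values : List Int) (out : (List (String × List Int)) × (List (String × List Int))) : Prop := out = filter_by_features_alt data feature values
instance (data : List (String × List Int)) (feature : String) (values : List Int) (out : (List (String × List Int)) × (List (String × List Int))) : Decidable (Spec_filter_by_features data feature values out) := by unfold Spec_filter_by_features; infer_instance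

-- ===== CLAIM (what is proved, stated in full; the proofs are below) =====
def Claim_equal_filter_by_features : Prop := ∀ (data : List (String × List Int)) (feature : String) (values : List Int), Dom_filter_by_features data feature values → Pre_filter_by_features data feature values → Spec_filter_by_features data feature values (filter_by_features data feature values)

-- ===== LEMMAS AND PROOFS =====

theorem pv_insert_getD_self (d : PySem.Dict String (List Int)) (k : String) (h : d.contains k = true) (hn : d.keys.Nodup) :
    d.insert k (d.getD k []) = d := by
  apply PySem.Dict.ext
  rw [PySem.Dict.items_insert_of_contains _ _ _]
  · conv_rhs => rw [PySem.Dict.items_eq_map_keys d hn ([] : List Int)]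
    conv_lhs => rw [PySem.Dict.items_eq_map_keys d hn ([] : List Int)]
    simp only [List.map_map]
    apply List.map_congr_left
    intro a ha
    simp only [Function.comp]
    by_cases hak : a = k <;> simp [hak, beq_iff_eq]
  · exact h

theorem pv_keys_modify_contains (d : PySem.Dict String (List Int)) (k : String) (f : List Int → List Int)
    (h : d.contains k = true) : (d.modify k [] f).keys = d.keys := by
  rw [PySem.Dict.keys_modify]; exact PySem.Dict.keys_insert_of_contains _ _ h

theorem pv_modify_modify (d : PySem.Dict String (List Int)) (k : String) (a b : List Int) :
    (d.modify k [] (· ++ a)).modify k [] (· ++ b) = d.modify k [] (· ++ (a ++ b)) := by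
  unfold PySem.Dict.modify
  simp only [PySem.Dict.getD_insert_self, PySem.Dict.insert_insert_self, List.append_assoc]

theorem pv_inner (zipped : List (Int × Int)) (values : List Int) (f : Int × Int → Int) (k : String)
    (w u : PySem.Dict String (List Int)) (hw : w.contains k = true) (hu : u.contains k = true)
    (hwn : w.keys.Nodup) (hun : u.keys.Nodup) :
    (zipped.foldl
      (fun (wu : PySem.Dict String (List Int) × PySem.Dict String (List Int)) vi =>
        if vi.1 ∈ values then (wu.1.modify k [] (· ++ [f vi]), wu.2)
        else (wu.1, wu.2.modify k [] (· ++ [f vi]))) (w, u))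
    = (w.modify k [] (· ++ (zipped.filter (fun vi => decide (vi.1 ∈ values))).map f),
       u.modify k [] (· ++ (zipped.filter (fun vi => decide (vi.1 ∉ values))).map f)) := by
  induction zipped generalizing w u with
  | nil =>
      simp only [List.foldl_nil, List.filter_nil, List.map_nil]
      unfold PySem.Dict.modify
      simp only [List.append_nil]
      rw [pv_insert_getD_self _ _ hw hwn, pv_insert_getD_self _ _ hu hun]
  | cons v t ih =>
      simp only [List.foldl_cons, List.filter_cons]
      by_cases hv : v.1 ∈ values
      · simp only [hv, if_pos, decide_true, not_true, decide_false, List.map_cons]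
        rw [ih _ _ (by rw [PySem.Dict.contains_modify]; simp [hw]) hu
              (by rw [pv_keys_modify_contains _ _ _ hw]; exact hwn) hun,
            pv_modify_modify]
        simp
      · simp only [hv, if_neg, decide_false, not_false_iff, decide_true, if_pos, List.map_cons]
        rw [ih _ _ hw (by rw [PySem.Dict.contains_modify]; simp [hu]) hwn
              (by rw [pv_keys_modify_contains _ _ _ hu]; exact hun),
            pv_modify_modify]
        simp

theorem pv_outer (K : List String) (zipped : List (Int × Int)) (values : List Int)
    (F : String → Int × Int → Int) (w u : PySem.Dict String (List Int))
    (hK : K.Nodup)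
    (hw : ∀ k ∈ K, w.contains k = true) (hu : ∀ k ∈ K, u.contains k = true)
    (hwn : w.keys.Nodup) (hun : u.keys.Nodup) :
    (K.foldl
      (fun (wu : PySem.Dict String (List Int) × PySem.Dict String (List Int)) k =>
        zipped.foldl
          (fun (wu : PySem.Dict String (List Int) × PySem.Dict String (List Int)) vi =>
            if vi.1 ∈ values then (wu.1.modify k [] (· ++ [F k vi]), wu.2)
            else (wu.1, wu.2.modify k [] (· ++ [F k vi]))) wu) (w, u)).1.keys = w.keys
    ∧ (K.foldl
      (fun (wu : PySem.Dict String (List Int) × PySem.Dict String (List Int)) k =>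
        zipped.foldl
          (fun (wu : PySem.Dict String (List Int) × PySem.Dict String (List Int)) vi =>
            if vi.1 ∈ values then (wu.1.modify k [] (· ++ [F k vi]), wu.2)
            else (wu.1, wu.2.modify k [] (· ++ [F k vi]))) wu) (w, u)).2.keys = u.keys
    ∧ ∀ k',
      ((K.foldl
        (fun (wu : PySem.Dict String (List Int) × PySem.Dict String (List Int)) k =>
          zipped.foldl
            (fun (wu : PySem.Dict String (List Int) × PySem.Dict String (List Int)) vi =>
              if vi.1 ∈ values then (wu.1.modify k [] (· ++ [F k vi]), wu.2)
              else (wu.1, wu.2.modify k [] (· ++ [F k vi]))) wu) (w, u)).1.getD k' []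
        = if k' ∈ K then w.getD k' [] ++ (zipped.filter (fun vi => decide (vi.1 ∈ values))).map (F k') else w.getD k' [])
      ∧ ((K.foldl
        (fun (wu : PySem.Dict String (List Int) × PySem.Dict String (List Int)) k =>
          zipped.foldl
            (fun (wu : PySem.Dict String (List Int) × PySem.Dict String (List Int)) vi =>
              if vi.1 ∈ values then (wu.1.modify k [] (· ++ [F k vi]), wu.2)
              else (wu.1, wu.2.modify k [] (· ++ [F k vi]))) wu) (w, u)).2.getD k' []
        = if k' ∈ K then u.getD k' [] ++ (zipped.filter (fun vi => decide (vi.1 ∉ values))).map (F k') else u.getD k' []) := by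
  induction K generalizing w u with
  | nil => simp
  | cons k K ih =>
      have hkK : k ∉ K := (List.nodup_cons.mp hK).1
      have hKn : K.Nodup := (List.nodup_cons.mp hK).2
      simp only [List.foldl_cons]
      rw [pv_inner zipped values (F k) k w u (hw k (by simp)) (hu k (by simp)) hwn hun]
      have hw' : ∀ j ∈ K, (w.modify k [] (· ++ (zipped.filter (fun vi => decide (vi.1 ∈ values))).map (F k))).contains j = true := by
        intro j hj; rw [PySem.Dict.contains_modify]; simp [hw j (by simp [hj])]
      have hu' : ∀ j ∈ K, (u.modify k [] (· ++ (zipped.filter (fun vi => decide (vi.1 ∉ values))).map (F k))).contains j = true := by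
        intro j hj; rw [PySem.Dict.contains_modify]; simp [hu j (by simp [hj])]
      have hwk' := pv_keys_modify_contains w k (· ++ (zipped.filter (fun vi => decide (vi.1 ∈ values))).map (F k)) (hw k (by simp))
      have huk' := pv_keys_modify_contains u k (· ++ (zipped.filter (fun vi => decide (vi.1 ∉ values))).map (F k)) (hu k (by simp))
      obtain ⟨ih1, ih2, ih3⟩ := ih _ _ hKn hw' hu' (hwk' ▸ hwn) (huk' ▸ hun)
      refine ⟨by rw [ih1, hwk'], by rw [ih2, huk'], ?_⟩
      intro k'
      obtain ⟨g1, g2⟩ := ih3 k'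
      constructor
      · rw [g1, PySem.Dict.getD_modify]
        by_cases h1 : k' = k
        · subst h1; simp [hkK]
        · by_cases h2 : k' ∈ K <;> simp [h1, h2]
      · rw [g2, PySem.Dict.getD_modify]
        by_cases h1 : k' = k
        · subst h1; simp [hkK]
        · by_cases h2 : k' ∈ K <;> simp [h1, h2]

theorem pv_init_getD (K : List String) (w : PySem.Dict String (List Int))
    (h : ∀ j, w.getD j [] = []) (j : String) :
    (K.foldl (fun w k => w.insert k ([] : List Int)) w).getD j [] = [] := by
  induction K generalizing w with
  | nil => exact h j
  | cons k K ih =>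
      simp only [List.foldl_cons]
      exact ih _ (fun j' => by rw [PySem.Dict.getD_insert]; split <;> simp [h])

theorem pv_init_keys (K : List String) (hK : K.Nodup) :
    (K.foldl (fun w k => w.insert k ([] : List Int)) PySem.Dict.empty).keys = K := by
  rw [PySem.Dict.keys_foldl_insert]
  rw [PySem.Dict.keys_empty]
  have := PySem.Set.update_eq_append_of_disjoint ([] : PySem.Set String) K hK (by simp)
  simpa using this

theorem pv_zip_range (col : List Int) (s : Int) :
    col.zip (PySem.List.pyRange s (s + col.length) 1)
      = (PySem.List.enumerate col s).map (fun q => (q.2, q.1)) := by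
  induction col generalizing s with
  | nil => simp [PySem.List.enumerate_nil]
  | cons x t ih =>
      rw [PySem.List.pyRange_one_cons (by simp only [List.length_cons]; push_cast; omega), PySem.List.enumerate_cons]
      simp only [List.zip_cons_cons, List.map_cons]
      have h1 : s + 1 + (t.length : Int) = s + (x :: t).length := by
        simp only [List.length_cons]; push_cast; omega
      have h2 := ih (s+1)
      rw [h1] at h2
      rw [h2]

theorem pv_zip_range0 (col : List Int) :
    col.zip (PySem.List.pyRange 0 (col.length : Int) 1)
      = (PySem.List.enumerate col).map (fun q => (q.2, q.1)) := by
  have h := pv_zip_range col 0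
  rw [zero_add] at h
  exact h

theorem pv_main (data : List (String × List Int)) (feature : String) (values : List Int)
    (hnd : (data.map Prod.fst).Nodup) :
    filter_by_features data feature values = filter_by_features_alt data feature values := by
  simp only [filter_by_features, filter_by_features_alt]
  have hkeys : (PySem.Dict.mk data).keys = data.map (fun x => x.1) := PySem.Dict.keys_mk data
  have hKnd : (PySem.Dict.mk data).keys.Nodup := by rw [hkeys]; exact hnd
  have hW0keys : ((PySem.Dict.mk data).keys.foldl (fun w k => w.insert k ([] : List Int)) PySem.Dict.empty).keys = (PySem.Dict.mk data).keys :=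
    pv_init_keys _ hKnd
  have hW0getD : ∀ j, ((PySem.Dict.mk data).keys.foldl (fun w k => w.insert k ([] : List Int)) PySem.Dict.empty).getD j [] = [] :=
    pv_init_getD _ _ (fun j => PySem.Dict.getD_empty j [])
  have hW0c : ∀ k ∈ (PySem.Dict.mk data).keys, ((PySem.Dict.mk data).keys.foldl (fun w k => w.insert k ([] : List Int)) PySem.Dict.empty).contains k = true := by
    intro k hk
    rw [PySem.Dict.contains_iff_mem_keys, hW0keys]
    exact hk
  have hW0nd : ((PySem.Dict.mk data).keys.foldl (fun w k => w.insert k ([] : List Int)) PySem.Dict.empty).keys.Nodup := by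
    rw [hW0keys]; exact hKnd
  obtain ⟨hk1, hk2, hg⟩ := pv_outer (PySem.Dict.mk data).keys
    ((((PySem.Dict.mk data).get? feature).getD []).zip (PySem.List.pyRange 0 (((PySem.Dict.mk data).get? feature).getD []).length 1))
    values
    (fun k vi => PySem.List.pyGetD (((PySem.Dict.mk data).get? k).getD []) vi.2 0)
    _ _ hKnd hW0c hW0c hW0nd hW0nd
  refine Prod.ext ?_ ?_
  · have hnd1 := hKnd
    rw [← hW0keys] at hnd1
    rw [← hk1] at hnd1
    rw [PySem.Dict.items_eq_map_keys _ hnd1 ([] : List Int)]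
    rw [hk1, hW0keys]
    apply List.ext_getElem
    · simp
    · intro i h1 h2
      have hbK : i < (PySem.Dict.mk data).keys.length := by simpa using h1
      have hbd : i < data.length := by simpa using h2
      simp only [List.getElem_map]
      obtain ⟨g1, -⟩ := hg ((PySem.Dict.mk data).keys[i]'hbK)
      rw [g1, if_pos (List.getElem_mem _), hW0getD, List.nil_append]
      have hKi : (PySem.Dict.mk data).keys[i]'hbK = (data[i]'hbd).1 := by
        have := List.getElem_of_eq hkeys hbK
        simpa using this
      have hget : (PySem.Dict.mk data).get? (data[i]'hbd).1 = some (data[i]'hbd).2 := by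
        apply PySem.Dict.get?_of_mem_items _ _ hKnd
        show ((data[i]'hbd).1, (data[i]'hbd).2) ∈ data
        simpa using List.getElem_mem _
      rw [hKi, hget]
      simp only [Option.getD_some]
      refine congrArg (fun l => ((data[i]'hbd).1, l)) ?_
      rw [pv_zip_range0, List.filter_map, List.map_map, List.map_map]
      apply List.map_congr_left
      intro q hq
      rfl
  · have hnd2 := hKnd
    rw [← hW0keys] at hnd2
    rw [← hk2] at hnd2
    rw [PySem.Dict.items_eq_map_keys _ hnd2 ([] : List Int)]
    rw [hk2, hW0keys]
    apply List.ext_getElem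
    · simp
    · intro i h1 h2
      have hbK : i < (PySem.Dict.mk data).keys.length := by simpa using h1
      have hbd : i < data.length := by simpa using h2
      simp only [List.getElem_map]
      obtain ⟨-, g2⟩ := hg ((PySem.Dict.mk data).keys[i]'hbK)
      rw [g2, if_pos (List.getElem_mem _), hW0getD, List.nil_append]
      have hKi : (PySem.Dict.mk data).keys[i]'hbK = (data[i]'hbd).1 := by
        have := List.getElem_of_eq hkeys hbK
        simpa using this
      have hget : (PySem.Dict.mk data).get? (data[i]'hbd).1 = some (data[i]'hbd).2 := by
        apply PySem.Dict.get?_of_mem_items _ _ hKnd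
        show ((data[i]'hbd).1, (data[i]'hbd).2) ∈ data
        simpa using List.getElem_mem _
      rw [hKi, hget]
      simp only [Option.getD_some]
      refine congrArg (fun l => ((data[i]'hbd).1, l)) ?_
      rw [pv_zip_range0, List.filter_map, List.map_map, List.map_map]
      apply List.map_congr_left
      intro q hq
      rfl

-- ===== VERDICT (by name: the statement is the Claim_ definition above) =====
theorem filter_by_features_spec : Claim_equal_filter_by_features := by
  intro data feature values _hdom hpre
  unfold Spec_filter_by_features
  exact pv_main data feature values hpre.1
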